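-- pv_equiv track=rewrite | github.com/torwhite/CS412 | Lab6/Archive/Lab_6.py | to_terminal
-- ===== SOURCE A (Python) =====
-- def to_terminal(group):
--     '''
--     Input:
--     group: A list of examples. Each example is a list, whose last element is the label.
--     Output:
--     label: the label indicating the most common class value in the group
--     '''
--     # *****START OF YOUR CODE (DO NOT DELETE/MODIFY THIS LINE)*****
--     classes = {}
--
--     # loop through examples, using dictionary to capture unique class and freq. count
--     for example in group:
--       if (example[-1] in classes):
--           classes[example[-1]] += 1
--       else:
--           classes[example[-1]] = 1
--     # label is the dict key with max value
--     label = max(classes, key=lambda k: classes[k])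
--     # *****END OF YOUR CODE (DO NOT DELETE/MODIFY THIS LINE)*****
--     return label
-- ===== SOURCE B (Python) =====
-- def to_terminal(group):
--     labels = [example[-1] for example in group]
--
--     def best(ls):
--         # partition off every occurrence of the first label, recurse on the rest
--         x = ls[0]
--         rest = [l for l in ls if l != x]
--         c = len(ls) - len(rest)
--         if not rest:
--             return x, c
--         y, cy = best(rest)
--         # >= keeps the earlier-appearing label on ties, like dict-insertion order in A
--         return (x, c) if cy <= c else (y, cy)
--
--     return best(labels)[0]
-- ===== Notes on version B (the rewrite author's own statement) =====
-- stated objective: alternative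
-- what changed: A builds a frequency dictionary in one counting pass and then takes a keyed max over it; B uses a recursive partition scheme: it splits off all occurrences of the first label, counts them by a length difference, recurses on the remainder, and compares counts on the way back (>= keeps the earlier label, reproducing A's tie-break) - no dictionary and no max pass exist in B.
import Mathlib
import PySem

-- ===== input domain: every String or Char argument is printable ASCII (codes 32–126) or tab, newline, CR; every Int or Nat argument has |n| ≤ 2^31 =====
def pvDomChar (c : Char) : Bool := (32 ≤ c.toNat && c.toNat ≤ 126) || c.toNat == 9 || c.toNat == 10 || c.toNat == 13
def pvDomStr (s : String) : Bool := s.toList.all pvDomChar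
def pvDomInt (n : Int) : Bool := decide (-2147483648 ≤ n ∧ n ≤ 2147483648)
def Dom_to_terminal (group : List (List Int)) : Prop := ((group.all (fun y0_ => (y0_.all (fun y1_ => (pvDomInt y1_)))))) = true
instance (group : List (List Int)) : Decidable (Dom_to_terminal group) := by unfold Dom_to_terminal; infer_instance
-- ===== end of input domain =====

-- B replaces A's dict-counting pass + keyed max by a recursive partition on the first label (alternative algorithm, not faster).

-- ===== PORT A =====
def to_terminal (group : List (List Int)) : Int :=
  let classes := group.foldl (fun d ex =>
      let k := (PySem.List.pyGet? ex (-1)).getD 0   -- example[-1]; none (IndexError) excluded by Pre_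
      if d.contains k then d.modify k 0 (· + 1) else d.insert k 1)
    (PySem.Dict.empty : PySem.Dict Int Int)
  -- max(classes, key=lambda k: classes[k]); empty dict (ValueError) excluded by Pre_
  (PySem.List.max? classes.keys (fun k => classes.getD k 0)).getD 0

-- ===== PORT B =====
-- best(ls): split off every occurrence of the first label, count by length difference, recurse.
-- The [] branch returns a dummy (0,0): B's Python never calls best on an empty list (guarded by `if not rest`).
def bestRec : List Int → Int × Int
  | [] => (0, 0)
  | x :: t =>
    let rest := (x :: t).filter (fun l => decide (l ≠ x))
    let c : Int := ((x :: t).length : Int) - (rest.length : Int)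
    if rest = [] then (x, c)
    else
      let p := bestRec rest
      if p.2 ≤ c then (x, c) else p
termination_by ls => ls.length
decreasing_by
  simp only [List.length_filter_lt_length_iff_exists]
  exact ⟨x, by simp⟩

def to_terminal_alt (group : List (List Int)) : Int :=
  let labels := group.map (fun ex => (PySem.List.pyGet? ex (-1)).getD 0)
  (bestRec labels).1

-- ===== PRECONDITION & SPEC =====
-- Pre_ excludes exactly the inputs on which A raises: an empty group (ValueError from max)
-- and any empty example (IndexError on example[-1]).
def Pre_to_terminal (group : List (List Int)) : Prop :=
  group ≠ [] ∧ ∀ ex ∈ group, ex ≠ []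
instance (group : List (List Int)) : Decidable (Pre_to_terminal group) := by
  unfold Pre_to_terminal; infer_instance
def pvWitness_to_terminal : List (List Int) := [[1, 0], [2, 0], [3, 1]]

def Spec_to_terminal (group : List (List Int)) (out : Int) : Prop := out = to_terminal_alt group
instance (group : List (List Int)) (out : Int) : Decidable (Spec_to_terminal group out) := by unfold Spec_to_terminal; infer_instance

-- ===== CLAIM (what is proved, stated in full; the proofs are below) =====
def Claim_equal_to_terminal : Prop := ∀ (group : List (List Int)), Dom_to_terminal group → Pre_to_terminal group → Spec_to_terminal group (to_terminal group)

-- ===== LEMMAS AND PROOFS =====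

-- A's if/else counting step is exactly Dict.modify (insert on a missing key = modify with default 0)
lemma step_eq_modify (d : PySem.Dict Int Int) (k : Int) :
    (if d.contains k then d.modify k 0 (· + 1) else d.insert k 1) = d.modify k 0 (· + 1) := by
  by_cases h : d.contains k = true
  · simp [h]
  · have h' : d.contains k = false := by simpa using h
    rw [PySem.Dict.modify, PySem.Dict.getD_of_not_contains d 0 h']
    simp [h']

-- the foldl step inside PySem.List.max?, named so lemmas can talk about it
def mstep (f : Int -> Int) (acc : Option Int) (x : Int) : Option Int :=
  match acc with
  | none => some x
  | some q => if f q < f x then some x else some q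

lemma max?_eq_foldl (f : Int -> Int) (xs : List Int) :
    PySem.List.max? xs f = xs.foldl (mstep f) none := by
  unfold PySem.List.max?
  congr 1
  funext acc x
  cases acc <;> rfl

-- max? only looks at the key function on members of the list
lemma max?_congr (xs : List Int) (k1 k2 : Int → Int)
    (h : ∀ x ∈ xs, k1 x = k2 x) : PySem.List.max? xs k1 = PySem.List.max? xs k2 := by
  have aux : ∀ (xs : List Int) (acc : Option Int),
      (∀ x ∈ xs, k1 x = k2 x) → (∀ m, acc = some m → k1 m = k2 m) →
      xs.foldl (mstep k1) acc = xs.foldl (mstep k2) acc := by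
    intro xs
    induction xs with
    | nil => intro acc _ _; rfl
    | cons y ys ih =>
      intro acc hmem hacc
      have hy : k1 y = k2 y := hmem y (by simp)
      cases acc with
      | none =>
        simp only [List.foldl_cons, mstep]
        exact ih (some y) (fun x hx => hmem x (by simp [hx])) (by intro m hm; cases hm; exact hy)
      | some m =>
        have hm : k1 m = k2 m := hacc m rfl
        simp only [List.foldl_cons, mstep, hm, hy]
        split_ifs with hlt
        · exact ih (some y) (fun x hx => hmem x (by simp [hx])) (by intro m hm; cases hm; exact hy)
        · exact ih (some m) (fun x hx => hmem x (by simp [hx])) (by intro m' hm'; cases hm'; exact hm)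
  rw [max?_eq_foldl, max?_eq_foldl]
  exact aux xs none h (by intro m hm; cases hm)

lemma classes_eq_counter (group : List (List Int)) :
    group.foldl (fun d ex =>
        if d.contains ((PySem.List.pyGet? ex (-1)).getD 0)
        then d.modify ((PySem.List.pyGet? ex (-1)).getD 0) 0 (· + 1)
        else d.insert ((PySem.List.pyGet? ex (-1)).getD 0) 1)
      PySem.Dict.empty
    = PySem.Dict.counter (group.map (fun ex => (PySem.List.pyGet? ex (-1)).getD 0)) := by
  rw [PySem.Dict.counter_eq_foldl, List.foldl_map]
  simp only [step_eq_modify]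

-- folding the strict-max step from a seed `some m` = compare m with the tail's max?
lemma foldl_max_some (f : Int → Int) : ∀ (L : List Int) (m : Int),
    L.foldl (mstep f) (some m)
    = some (match PySem.List.max? L f with | none => m | some r => if f m < f r then r else m) := by
  intro L
  induction L with
  | nil => intro m; simp [PySem.List.max?]
  | cons y ys ih =>
    intro m
    have hstep : PySem.List.max? (y :: ys) f = ys.foldl (mstep f) (some y) := by
      rw [max?_eq_foldl]; rfl
    rw [hstep, ih y]
    simp only [List.foldl_cons, mstep]
    by_cases h1 : f m < f y
    · rw [if_pos h1, ih y]
      cases hys : PySem.List.max? ys f with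
      | none => simp [h1]
      | some r =>
        by_cases h2 : f y < f r
        · have h3 : f m < f r := lt_trans h1 h2
          simp [h2, h3]
        · simp [h2, h1]
    · rw [if_neg h1, ih m]
      cases hys : PySem.List.max? ys f with
      | none => simp [h1]
      | some r =>
        by_cases h2 : f y < f r
        · simp [h2]
        · have h3 : ¬ f m < f y := h1
          by_cases h4 : f m < f r
          · exact absurd (lt_of_lt_of_le h4 (le_of_not_gt h2)) h1
          · simp [h2, h4, h1]

lemma max?_cons (f : Int → Int) (x : Int) (L : List Int) :
    PySem.List.max? (x :: L) f
    = some (match PySem.List.max? L f with | none => x | some r => if f x < f r then r else x) := by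
  have hstep : PySem.List.max? (x :: L) f = L.foldl (mstep f) (some x) := by
    rw [max?_eq_foldl]; rfl
  rw [hstep, foldl_max_some]

-- ordered dedup peels off the first element and all its later occurrences
lemma ofList_foldl_filter (x : Int) : ∀ (t : List Int) (s : PySem.Set Int), x ∈ s →
    t.foldl PySem.Set.add s = (t.filter (fun l => decide (l ≠ x))).foldl PySem.Set.add s := by
  intro t
  induction t with
  | nil => intro s _; rfl
  | cons y ys ih =>
    intro s hx
    by_cases hy : y = x
    · subst hy
      have hfc : (y :: ys).filter (fun l => decide (l ≠ y)) = ys.filter (fun l => decide (l ≠ y)) := by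
        simp
      rw [hfc, List.foldl_cons, PySem.Set.add_of_mem hx]
      exact ih s hx
    · have : (decide (y ≠ x)) = true := by simp [hy]
      simp only [List.filter_cons, this, List.foldl_cons]
      exact ih (PySem.Set.add s y) (by rw [PySem.Set.mem_add]; exact Or.inl hx)

lemma foldl_add_cons_notmem (a : Int) : ∀ (t : List Int) (s : List Int), a ∉ s → (∀ y ∈ t, y ≠ a) →
    t.foldl PySem.Set.add (a :: s) = a :: t.foldl PySem.Set.add s := by
  intro t
  induction t with
  | nil => intro s _ _; rfl
  | cons y ys ih =>
    intro s ha hy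
    have hya : y ≠ a := hy y (by simp)
    have h1 : PySem.Set.add (a :: s) y = a :: PySem.Set.add s y := by
      by_cases hm : y ∈ s
      · rw [PySem.Set.add_of_mem (by simp [hm]), PySem.Set.add_of_mem hm]
      · rw [PySem.Set.add_of_not_mem (by simp [hya, hm]), PySem.Set.add_of_not_mem hm]
        rfl
    simp only [List.foldl_cons, h1]
    apply ih
    · by_cases hm : y ∈ s
      · rw [PySem.Set.add_of_mem hm]; exact ha
      · rw [PySem.Set.add_of_not_mem hm]
        intro hmem'
        rcases List.mem_append.mp hmem' with h | h
        · exact ha h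
        · exact hya (List.mem_singleton.mp h).symm
    · exact fun z hz => hy z (by simp [hz])

lemma dedup_cons (x : Int) (t : List Int) :
    PySem.List.dedup (x :: t) = x :: PySem.List.dedup (t.filter (fun l => decide (l ≠ x))) := by
  show PySem.Set.ofList (x :: t) = x :: PySem.Set.ofList (t.filter (fun l => decide (l ≠ x)))
  have h0 : PySem.Set.ofList (x :: t) = t.foldl PySem.Set.add [x] := by
    simp [PySem.Set.ofList, PySem.Set.add, PySem.Set.empty]
  rw [h0, ofList_foldl_filter x t [x] (by simp)]
  rw [foldl_add_cons_notmem x _ [] (by simp) (by intro y hy; simp at hy; exact hy.2)]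
  rfl

-- count of the head = length minus length of the filtered rest
lemma count_head_eq (x : Int) (ls : List Int) :
    ((ls.length : Int) - ((ls.filter (fun l => decide (l ≠ x))).length : Int)) = (ls.count x : Int) := by
  have h : ls.length = (ls.filter (fun l => decide (l ≠ x))).length + ls.count x := by
    induction ls with
    | nil => simp
    | cons y ys ih =>
      by_cases hy : y = x
      · subst hy; simp [ih]; omega
      · simp [hy, List.count_cons, ih]; omega
  omega

lemma count_filter_ne (k x : Int) (hk : k ≠ x) (ls : List Int) :
    (ls.filter (fun l => decide (l ≠ x))).count k = ls.count k := by
  induction ls with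
  | nil => rfl
  | cons y ys ih =>
    by_cases hy : y = x
    · subst hy
      rw [List.filter_cons, if_neg (by simp : ¬ ((decide (y ≠ y)) = true)), ih,
        List.count_cons]
      simp [Ne.symm hk]
    · rw [List.filter_cons, if_pos (by simp [hy] : ((decide (y ≠ x)) = true)),
        List.count_cons, List.count_cons, ih]

-- the heart of the equivalence: bestRec computes the first label of maximal count, with its count
lemma bestRec_spec : ∀ (n : Nat) (ls : List Int), ls.length ≤ n → ls ≠ [] →
    PySem.List.max? (PySem.List.dedup ls) (fun k => (ls.count k : Int)) = some (bestRec ls).1 ∧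
    (bestRec ls).2 = (ls.count (bestRec ls).1 : Int) := by
  intro n
  induction n with
  | zero => intro ls hlen hne; cases ls with
    | nil => exact absurd rfl hne
    | cons x t => simp at hlen
  | succ n ih =>
    intro ls hlen hne
    cases ls  with
    | nil => exact absurd rfl hne
    | cons x t =>
      have hfilter : (x :: t).filter (fun l => decide (l ≠ x)) = t.filter (fun l => decide (l ≠ x)) := by
        simp [List.filter_cons]
      set rest := t.filter (fun l => decide (l ≠ x)) with hrest
      have hcnt : ∀ k, k ≠ x → rest.count k = (x :: t).count k := by
        intro k hk
        rw [hrest, ← count_filter_ne k x hk (x :: t), hfilter]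
      have hc : (((x :: t).length : Int) - (rest.length : Int)) = ((x :: t).count x : Int) := by
        have h := count_head_eq x (x :: t)
        rw [hfilter] at h
        exact h
      have hdefn : bestRec (x :: t) =
          (if rest = [] then (x, (((x :: t).length : Int) - (rest.length : Int)))
           else
             let p := bestRec rest
             if p.2 ≤ (((x :: t).length : Int) - (rest.length : Int))
             then (x, (((x :: t).length : Int) - (rest.length : Int))) else p) := by
        rw [bestRec]
        simp only [hfilter, ← hrest]
      have hded : PySem.List.dedup (x :: t) = x :: PySem.List.dedup rest := by
        rw [dedup_cons, hrest]
      have hkey : PySem.List.max? (PySem.List.dedup rest) (fun k => ((x :: t).count k : Int))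
          = PySem.List.max? (PySem.List.dedup rest) (fun k => (rest.count k : Int)) := by
        apply max?_congr
        intro k hkmem
        have hkrest : k ∈ rest := (PySem.List.mem_dedup rest k).mp hkmem
        have hkx : k ≠ x := by
          have := List.of_mem_filter hkrest
          simpa using this
        rw [hcnt k hkx]
      rw [hded, max?_cons, hkey]
      by_cases hr : rest = []
      · rw [hr] at hc
        rw [hdefn, if_pos hr, hr]
        constructor
        · simp [PySem.List.max?]
        · simpa using hc
      · have hlen' : rest.length ≤ n := by
          have h1 : rest.length < (x :: t).length := by
            rw [hrest]
            calc rest.length ≤ t.length := by rw [hrest]; exact List.length_filter_le _ _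
            _ < (x :: t).length := by simp
          omega
        obtain ⟨ihmax, ihcnt⟩ := ih rest hlen' hr
        rw [ihmax]
        rw [hdefn, if_neg hr]
        set p := bestRec rest with hp
        have hpx : p.1 ≠ x := by
          have hmem : p.1 ∈ rest := (PySem.List.mem_dedup rest p.1).mp (PySem.List.max?_mem ihmax)
          have := List.of_mem_filter hmem
          simpa using this
        have hpcnt : (p.2 : Int) = ((x :: t).count p.1 : Int) := by
          rw [ihcnt, hcnt p.1 hpx]
        simp only
        have hcc : (x :: t).count x = t.count x + 1 := by simp [List.count_cons]
        by_cases hle : p.2 ≤ (((x :: t).length : Int) - (rest.length : Int))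
        · rw [if_pos hle]
          have hnlt : ¬ ((x :: t).count x : Int) < ((x :: t).count p.1 : Int) := by
            rw [← hpcnt, ← hc]; omega
          have hnlt' : ¬ ((t.count x : Int) + 1 < ((x :: t).count p.1 : Int)) := by omega
          refine ⟨by simp [hnlt'], ?_⟩
          rw [hc]
        · rw [if_neg hle]
          have hlt : ((x :: t).count x : Int) < ((x :: t).count p.1 : Int) := by
            rw [← hpcnt, ← hc]; omega
          have hlt' : ((t.count x : Int) + 1 < ((x :: t).count p.1 : Int)) := by omega
          constructor
          · simp [hlt']
          · rw [hpcnt]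

-- ===== VERDICT (by name: the statement is the Claim_ definition above) =====
theorem to_terminal_spec : Claim_equal_to_terminal := by
  intro group _ hpre
  unfold Spec_to_terminal
  set labels := group.map (fun ex => (PySem.List.pyGet? ex (-1)).getD 0) with hlab
  have hA : to_terminal group
      = (PySem.List.max? (PySem.List.dedup labels) (fun k => (labels.count k : Int))).getD 0 := by
    unfold to_terminal
    rw [show (group.foldl (fun d ex =>
        let k := (PySem.List.pyGet? ex (-1)).getD 0
        if d.contains k then d.modify k 0 (· + 1) else d.insert k 1)
        (PySem.Dict.empty : PySem.Dict Int Int)) = PySem.Dict.counter labels from by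
      rw [hlab, ← classes_eq_counter]]
    simp only [PySem.Dict.keys_counter, ← PySem.List.dedup_eq_ofList]
    congr 1
    apply max?_congr
    intro k _
    exact PySem.Dict.getD_counter _ k
  have hne : labels ≠ [] := by
    rw [hlab]
    simp only [ne_eq, List.map_eq_nil_iff]
    exact hpre.1
  obtain ⟨hmax, _⟩ := bestRec_spec labels.length labels le_rfl hne
  rw [hA, hmax]
  rfl
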